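-- pv_equiv track=rewrite | github.com/zhongliwu/leetcode | twopointers/t610_two_diff.py | two_sum7
-- ===== SOURCE A (Python) =====
-- from typing import (
--     List,
-- )
--
-- def two_sum7(nums: List[int], target: int) -> List[int]:
--     # write your code here
--     if nums is None or len(nums) == 0:
--         return []
--
--     nums.sort()
--     left, right, t = 0, 0, abs(target)
--     while right < len(nums):
--         if left == right:
--             right += 1
--             continue
--         cur_diff = nums[right] - nums[left]
--         if cur_diff == t:
--             return [nums[left], nums[right]]
--         elif cur_diff > t:
--             left += 1
--         else:
--             right += 1
--
--     return [-1, -1]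
-- ===== SOURCE B (Python) =====
-- def two_sum7(nums, target):
--     # Single ascending pass over the sorted list with hash lookups,
--     # instead of A's converging two-pointer walk.
--     if nums is None or len(nums) == 0:
--         return []
--     nums.sort()
--     t = abs(target)
--     if t == 0:
--         counts = {}
--         for v in nums:
--             counts[v] = counts.get(v, 0) + 1
--         for v in nums:
--             if counts[v] >= 2:
--                 return [v, v]
--     else:
--         values = set(nums)
--         for v in nums:
--             if v + t in values:
--                 return [v, v + t]
--     return [-1, -1]
-- ===== Notes on version B (the rewrite author's own statement) =====
-- stated objective: alternative
-- what changed: Replaces the converging two-pointer walk over the sorted list by a single ascending pass that does hash lookups (a value set for t>0, a count dictionary for t==0), returning the first value v whose partner v+t exists.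
import Mathlib
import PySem

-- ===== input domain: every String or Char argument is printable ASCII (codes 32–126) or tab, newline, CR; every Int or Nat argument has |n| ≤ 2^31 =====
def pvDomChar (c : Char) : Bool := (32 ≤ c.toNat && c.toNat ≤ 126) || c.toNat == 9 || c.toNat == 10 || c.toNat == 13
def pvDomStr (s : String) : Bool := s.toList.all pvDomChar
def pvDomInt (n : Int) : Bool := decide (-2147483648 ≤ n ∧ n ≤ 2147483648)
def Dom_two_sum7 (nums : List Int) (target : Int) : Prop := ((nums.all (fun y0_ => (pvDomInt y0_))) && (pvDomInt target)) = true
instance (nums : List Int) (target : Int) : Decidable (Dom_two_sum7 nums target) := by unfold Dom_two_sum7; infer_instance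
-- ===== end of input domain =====

-- B replaces A's converging two-pointer walk by one ascending pass with hash lookups
-- (same asymptotic cost; the sort dominates). Return-value equivalence only; both A and B
-- sort `nums` in place (`nums.sort()`), the same observable mutation.

-- ===== PORT A =====
-- Python's `while right < len(nums)` loop, fuel-recursive; indices are always in range
-- when reached (right < len checked, left ≤ right), so `getD _ 0` is exact here.
def twoSumLoop (s : List Int) (t : Int) : Nat → Nat → Nat → List Int
  | 0, _, _ => [-1, -1]
  | fuel + 1, left, right =>
    if right < s.length then
      if left = right then twoSumLoop s t fuel left (right + 1)
      else
        let curDiff := s.getD right 0 - s.getD left 0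
        if curDiff = t then [s.getD left 0, s.getD right 0]
        else if curDiff > t then twoSumLoop s t fuel (left + 1) right
        else twoSumLoop s t fuel left (right + 1)
    else [-1, -1]

def two_sum7 (nums : List Int) (target : Int) : List Int :=
  if nums.length = 0 then []
  else
    let s := PySem.List.sorted nums (fun x => x) false
    twoSumLoop s |target| (2 * s.length + 1) 0 0

-- ===== PORT B =====
def two_sum7_alt (nums : List Int) (target : Int) : List Int :=
  if nums.length = 0 then []
  else
    let s := PySem.List.sorted nums (fun x => x) false
    let t := |target|
    if t = 0 then
      let counts : PySem.Dict Int Int := s.foldl (fun d v => d.insert v (d.getD v 0 + 1)) PySem.Dict.empty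
      match s.find? (fun v => decide (2 ≤ counts.getD v 0)) with
      | some v => [v, v]
      | none => [-1, -1]
    else
      let values : PySem.Set Int := PySem.Set.ofList s
      match s.find? (fun v => PySem.Set.contains values (v + t)) with
      | some v => [v, v + t]
      | none => [-1, -1]

-- ===== PRECONDITION & SPEC =====
def Spec_two_sum7 (nums : List Int) (target : Int) (out : List Int) : Prop := out = two_sum7_alt nums target
instance (nums : List Int) (target : Int) (out : List Int) : Decidable (Spec_two_sum7 nums target out) := by unfold Spec_two_sum7; infer_instance

-- ===== CLAIM (what is proved, stated in full; the proofs are below) =====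
def Claim_equal_two_sum7 : Prop := ∀ (nums : List Int) (target : Int), Dom_two_sum7 nums target → Spec_two_sum7 nums target (two_sum7 nums target)

-- ===== LEMMAS AND PROOFS =====

-- `hasPB s t i`: index i of s has a partner j > i with s[j] - s[i] = t.
def hasPB (s : List Int) (t : Int) (i : Nat) : Bool :=
  (List.range s.length).any (fun j => decide (i < j ∧ s.getD j 0 - s.getD i 0 = t))

-- common reference result: the pair at the least index having a partner
def specRes (s : List Int) (t : Int) : List Int :=
  match (List.range s.length).find? (hasPB s t) with
  | some i => [s.getD i 0, s.getD i 0 + t]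
  | none => [-1, -1]

lemma hasPB_iff (s : List Int) (t : Int) (i : Nat) :
    hasPB s t i = true ↔ ∃ j, j < s.length ∧ i < j ∧ s.getD j 0 - s.getD i 0 = t := by
  simp [hasPB, List.mem_range]

lemma hasPB_false_iff (s : List Int) (t : Int) (i : Nat) :
    hasPB s t i = false ↔ ∀ j, j < s.length → i < j → s.getD j 0 - s.getD i 0 ≠ t := by
  rw [← Bool.not_eq_true, hasPB_iff]; push_neg; rfl

lemma getD_mono {s : List Int} (hs : s.Pairwise (· ≤ ·)) {i j : Nat}
    (hij : i ≤ j) (hj : j < s.length) : s.getD i 0 ≤ s.getD j 0 := by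
  rcases Nat.lt_or_ge i j with h | h
  · rw [List.getD_eq_getElem _ _ (lt_trans h hj), List.getD_eq_getElem _ _ hj]
    exact List.pairwise_iff_getElem.mp hs i j (lt_trans h hj) hj h
  · have : i = j := le_antisymm hij h
    subst this; rfl

lemma find?_least {α : Type} (p : α → Bool) (d : α) :
    ∀ (l : List α) (i : Nat), i < l.length → p (l.getD i d) = true →
      (∀ j, j < i → p (l.getD j d) = false) → l.find? p = some (l.getD i d) := by
  intro l
  induction l with
  | nil => intro i hi; simp at hi
  | cons x xs ih =>
    intro i hi hp hmin
    by_cases hx : p x = true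
    · cases i with
      | zero => simp [List.find?, hx]
      | succ k =>
        have := hmin 0 (Nat.succ_pos k)
        simp [List.getD] at this
        rw [this] at hx; simp at hx
    · have hx' : p x = false := by simpa using hx
      cases i with
      | zero => simp [List.getD] at hp; rw [hp] at hx'; simp at hx'
      | succ k =>
        have : (x :: xs).find? p = xs.find? p := by simp [List.find?, hx']
        rw [this]
        have hk : k < xs.length := by simpa using hi
        have hpk : p (xs.getD k d) = true := by simpa [List.getD] using hp
        have hmin' : ∀ j, j < k → p (xs.getD j d) = false := by
          intro j hj
          have := hmin (j + 1) (by omega)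
          simpa [List.getD] using this
        simpa [List.getD] using ih k hk hpk hmin'

lemma find?_none_of_all {α : Type} (p : α → Bool) (d : α) (l : List α)
    (h : ∀ j, j < l.length → p (l.getD j d) = false) : l.find? p = none := by
  rw [List.find?_eq_none]
  intro x hx
  rcases List.mem_iff_getElem.mp hx with ⟨j, hj, rfl⟩
  have := h j hj
  rw [List.getD_eq_getElem _ _ hj] at this
  simp [this]

lemma getD_range (n i : Nat) (hi : i < n) : (List.range n).getD i 0 = i := by
  rw [List.getD_eq_getElem _ _ (by simpa using hi)]
  simp

-- A's loop, under its invariants, computes specRes.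
lemma twoSumLoop_eq (s : List Int) (t : Int) (hs : s.Pairwise (· ≤ ·)) (ht : 0 ≤ t) :
    ∀ fuel l r, l ≤ r → r ≤ s.length → 2 * s.length < fuel + l + r →
      (∀ i, i < l → hasPB s t i = false) →
      (∀ j, l < j → j < r → s.getD j 0 - s.getD l 0 < t) →
      twoSumLoop s t fuel l r = specRes s t := by
  intro fuel
  induction fuel with
  | zero => intro l r hlr hrn hfuel _ _; omega
  | succ fuel ih =>
    intro l r hlr hrn hfuel I1 I2
    rw [twoSumLoop]
    by_cases hr : r < s.length
    · simp only [hr, if_true]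
      by_cases heq : l = r
      · simp only [heq, if_true]
        subst heq
        exact ih l (l + 1) (by omega) (by omega) (by omega) I1 (by omega)
      · simp only [heq, if_false]
        have hlr' : l < r := lt_of_le_of_ne hlr heq
        set d := s.getD r 0 - s.getD l 0 with hd
        by_cases hdt : d = t
        · simp only [hdt, if_true]
          have hln : l < s.length := lt_trans hlr' hr
          have hpl : hasPB s t l = true :=
            (hasPB_iff s t l).mpr ⟨r, hr, hlr', hdt⟩
          have hfind : (List.range s.length).find? (hasPB s t) = some l := by
            have := find?_least (hasPB s t) 0 (List.range s.length) l
              (by simpa using hln)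
              (by rwa [getD_range _ _ hln])
              (fun j hj => by rw [getD_range _ _ (lt_trans hj hln)]; exact I1 j hj)
            rwa [getD_range _ _ hln] at this
          rw [specRes, hfind]
          have : s.getD r 0 = s.getD l 0 + t := by omega
          rw [this]
        · simp only [hdt, if_false]
          by_cases hgt : d > t
          · simp only [hgt, if_true]
            -- left advances: l has no partner at all
            have hnl : hasPB s t l = false := by
              rw [hasPB_false_iff]
              intro j hj hlj habs
              rcases Nat.lt_or_ge j r with hjr | hjr
              · exact absurd habs (ne_of_lt (I2 j hlj hjr))
              · have : s.getD r 0 ≤ s.getD j 0 := getD_mono hs hjr hj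
                omega
            have I1' : ∀ i, i < l + 1 → hasPB s t i = false := by
              intro i hi
              rcases Nat.lt_or_ge i l with h | h
              · exact I1 i h
              · have : i = l := by omega
                subst this; exact hnl
            have I2' : ∀ j, l + 1 < j → j < r → s.getD j 0 - s.getD (l + 1) 0 < t := by
              intro j hj hjr
              have h1 : s.getD j 0 - s.getD l 0 < t := I2 j (by omega) hjr
              have h2 : s.getD l 0 ≤ s.getD (l + 1) 0 :=
                getD_mono hs (by omega) (by omega)
              omega
            exact ih (l + 1) r (by omega) (by omega) (by omega) I1' I2'
          · simp only [hgt, if_false]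
            have I2' : ∀ j, l < j → j < r + 1 → s.getD j 0 - s.getD l 0 < t := by
              intro j hj hjr
              rcases Nat.lt_or_ge j r with h | h
              · exact I2 j hj h
              · have : j = r := by omega
                subst this; omega
            exact ih l (r + 1) (by omega) (by omega) (by omega) I1 I2'
    · simp only [hr, if_false]
      have hrn' : r = s.length := by omega
      subst hrn'
      have hall : ∀ i, i < s.length → hasPB s t i = false := by
        intro i hi
        rcases Nat.lt_or_ge i l with h | h
        · exact I1 i h
        · rw [hasPB_false_iff]
          intro j hj hij habs
          have hlj : l < j := lt_of_le_of_lt h hij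
          have h1 : s.getD j 0 - s.getD l 0 < t := I2 j hlj hj
          have h2 : s.getD l 0 ≤ s.getD i 0 := getD_mono hs h hi
          omega
      rw [specRes, find?_none_of_all (hasPB s t) 0 _
        (fun j hj => by rw [getD_range _ _ (by simpa using hj)]; exact hall j (by simpa using hj))]

-- count has two occurrences → two distinct indices, and conversely
lemma two_of_count (v : Int) :
    ∀ (s : List Int), 2 ≤ s.count v →
      ∃ p q, p < q ∧ q < s.length ∧ s.getD p 0 = v ∧ s.getD q 0 = v := by
  intro s
  induction s with
  | nil => simp
  | cons x xs ih =>
    intro h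
    by_cases hx : x = v
    · subst hx
      have h1 : 1 ≤ xs.count x := by
        rw [List.count_cons_self] at h; omega
      have hv : x ∈ xs := by
        rw [← List.count_pos_iff]; omega
      rcases List.mem_iff_getElem.mp hv with ⟨q, hq, hqv⟩
      refine ⟨0, q + 1, by omega, by simpa using hq, rfl, ?_⟩
      rw [List.getD_cons_succ, List.getD_eq_getElem _ _ hq]
      exact hqv
    · have h' : 2 ≤ xs.count v := by
        rwa [List.count_cons_of_ne (fun hc => hx hc)] at h
      rcases ih h' with ⟨p, q, hpq, hq, hp1, hq1⟩
      exact ⟨p + 1, q + 1, by omega, by simpa using hq, by simpa using hp1, by simpa using hq1⟩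

lemma count_ge_two (s : List Int) (v : Int) (p q : Nat) (hpq : p < q) (hq : q < s.length)
    (hp1 : s.getD p 0 = v) (hq1 : s.getD q 0 = v) : 2 ≤ s.count v := by
  have hsplit : s = s.take q ++ s.drop q := (List.take_append_drop q s).symm
  have hp : p < s.length := lt_trans hpq hq
  have hv1 : v ∈ s.take q := by
    rw [List.mem_iff_getElem]
    refine ⟨p, by simp [List.length_take]; omega, ?_⟩
    rw [List.getElem_take]
    rw [List.getD_eq_getElem _ _ hp] at hp1
    exact hp1
  have hv2 : v ∈ s.drop q := by
    rw [List.mem_iff_getElem]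
    refine ⟨0, by simp [List.length_drop]; omega, ?_⟩
    have h0 : s[q]'hq = v := by rw [List.getD_eq_getElem _ _ hq] at hq1; exact hq1
    simpa using h0
  calc 2 = 1 + 1 := rfl
    _ ≤ (s.take q).count v + (s.drop q).count v := by
        have := List.count_pos_iff.mpr hv1
        have := List.count_pos_iff.mpr hv2
        omega
    _ = s.count v := by rw [← List.count_append, ← hsplit]

-- B computes specRes as well.
lemma alt_eq_specRes (nums : List Int) (target : Int) (hne : nums.length ≠ 0) :
    two_sum7_alt nums target = specRes (PySem.List.sorted nums (fun x => x) false) |target| := by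
  set s := PySem.List.sorted nums (fun x => x) false with hsdef
  have hs : s.Pairwise (· ≤ ·) := by
    have := PySem.List.sorted_pairwise nums (fun x => x)
    simpa using this
  set t := |target| with htdef
  have ht : 0 ≤ t := abs_nonneg _
  -- predicate used by B's scan, as a function of the value
  rw [two_sum7_alt, if_neg hne]
  simp only [← hsdef, ← htdef]
  by_cases hex : ∃ i, hasPB s t i = true
  · -- least index with a partner
    set i0 := Nat.find hex with hi0def
    have hp0 : hasPB s t i0 = true := Nat.find_spec hex
    have hmin : ∀ m, m < i0 → hasPB s t m = false := by
      intro m hm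
      have := Nat.find_min hex hm
      simpa using this
    rcases (hasPB_iff s t i0).mp hp0 with ⟨j0, hj0, hij0, hdiff0⟩
    have hi0n : i0 < s.length := lt_trans hij0 hj0
    have hrange : (List.range s.length).find? (hasPB s t) = some i0 := by
      have := find?_least (hasPB s t) 0 (List.range s.length) i0
        (by simpa using hi0n)
        (by rwa [getD_range _ _ hi0n])
        (fun j hj => by rw [getD_range _ _ (lt_trans hj hi0n)]; exact hmin j hj)
      rwa [getD_range _ _ hi0n] at this
    rw [specRes, hrange]
    by_cases ht0 : t = 0
    · simp only [ht0, if_true]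
      have hfun : (fun v : Int => decide (2 ≤ (List.foldl (fun d v => PySem.Dict.insert d v (PySem.Dict.getD d v 0 + 1)) (PySem.Dict.empty : PySem.Dict Int Int) s).getD v 0))
          = (fun v : Int => decide (2 ≤ (PySem.Dict.counter s).getD v 0)) := by
        funext v
        rw [PySem.Dict.foldl_insert_getD_add_one_eq_counter]
      rw [hfun]
      -- find? over s returns s[i0]
      have hqt : (fun v => decide (2 ≤ (PySem.Dict.counter s).getD v 0)) (s.getD i0 0) = true := by
        have hj0v : s.getD j0 0 = s.getD i0 0 := by omega
        have : 2 ≤ s.count (s.getD i0 0) :=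
          count_ge_two s (s.getD i0 0) i0 j0 hij0 hj0 rfl hj0v
        simp only [PySem.Dict.getD_counter]
        simp
        exact_mod_cast this
      have hqf : ∀ j, j < i0 → (fun v => decide (2 ≤ (PySem.Dict.counter s).getD v 0)) (s.getD j 0) = false := by
        intro j hj
        simp only [PySem.Dict.getD_counter, decide_eq_false_iff_not]
        intro habs
        have hcount : 2 ≤ s.count (s.getD j 0) := by exact_mod_cast habs
        rcases two_of_count _ s hcount with ⟨p, q, hpq, hqn, hp1, hq1⟩
        have hpPB : hasPB s t p = true :=
          (hasPB_iff s t p).mpr ⟨q, hqn, hpq, by rw [hp1, hq1]; omega⟩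
        have hp_ge : i0 ≤ p := by
          by_contra hc
          rw [hmin p (by omega)] at hpPB; simp at hpPB
        -- then s[j] = s[i0], so j itself has partner i0 : contradiction with minimality
        have hpn : p < s.length := lt_trans hpq hqn
        have c1 : s.getD j 0 ≤ s.getD i0 0 := getD_mono hs (le_of_lt hj) hi0n
        have c2 : s.getD i0 0 ≤ s.getD p 0 := getD_mono hs hp_ge hpn
        have hji0 : s.getD i0 0 = s.getD j 0 := by omega
        have : hasPB s t j = true :=
          (hasPB_iff s t j).mpr ⟨i0, hi0n, hj, by omega⟩
        rw [hmin j hj] at this; simp at this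
      have hfs := find?_least (fun v => decide (2 ≤ (PySem.Dict.counter s).getD v 0)) 0 s i0 hi0n hqt hqf
      simp only [hfs]
      simp
    · simp only [ht0, if_false]
      have hqt : (fun v => PySem.Set.contains (PySem.Set.ofList s) (v + t)) (s.getD i0 0) = true := by
        rw [PySem.Set.contains_iff, PySem.Set.mem_ofList]
        have : s.getD j0 0 = s.getD i0 0 + t := by omega
        rw [← this, List.getD_eq_getElem _ _ hj0]
        exact List.getElem_mem _
      have hqf : ∀ j, j < i0 → (fun v => PySem.Set.contains (PySem.Set.ofList s) (s.getD j 0 + t)) (s.getD j 0) = false := by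
        intro j hj
        by_contra hc
        have hmem : s.getD j 0 + t ∈ s := by
          rw [← PySem.Set.mem_ofList, ← PySem.Set.contains_iff]
          simpa using hc
        rcases List.mem_iff_getElem.mp hmem with ⟨k, hk, hkv⟩
        have hkD : s.getD k 0 = s.getD j 0 + t := by
          rw [List.getD_eq_getElem _ _ hk]; exact hkv
        have htpos : 0 < t := lt_of_le_of_ne ht (fun h => ht0 h.symm)
        have hjk : j < k := by
          by_contra hc2
          have : s.getD k 0 ≤ s.getD j 0 := getD_mono hs (by omega) (lt_trans hj hi0n)
          omega
        have : hasPB s t j = true :=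
          (hasPB_iff s t j).mpr ⟨k, hk, hjk, by omega⟩
        rw [hmin j hj] at this; simp at this
      have hfs := find?_least (fun v => PySem.Set.contains (PySem.Set.ofList s) (v + t)) 0 s i0 hi0n hqt hqf
      simp only [hfs]
  · -- no index has a partner: both sides [-1, -1]
    push_neg at hex
    have hall : ∀ i, hasPB s t i = false := fun i => by
      have := hex i; simpa using this
    have hrange : (List.range s.length).find? (hasPB s t) = none :=
      find?_none_of_all _ 0 _ (fun j hj => by
        rw [getD_range _ _ (by simpa using hj)]; exact hall _)
    rw [specRes, hrange]
    by_cases ht0 : t = 0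
    · simp only [ht0, if_true]
      have hfun : (fun v : Int => decide (2 ≤ (List.foldl (fun d v => PySem.Dict.insert d v (PySem.Dict.getD d v 0 + 1)) (PySem.Dict.empty : PySem.Dict Int Int) s).getD v 0))
          = (fun v : Int => decide (2 ≤ (PySem.Dict.counter s).getD v 0)) := by
        funext v
        rw [PySem.Dict.foldl_insert_getD_add_one_eq_counter]
      rw [hfun]
      have : s.find? (fun v => decide (2 ≤ (PySem.Dict.counter s).getD v 0)) = none := by
        apply find?_none_of_all _ 0
        intro j hj
        simp only [PySem.Dict.getD_counter, decide_eq_false_iff_not]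
        intro habs
        have hcount : 2 ≤ s.count (s.getD j 0) := by exact_mod_cast habs
        rcases two_of_count _ s hcount with ⟨p, q, hpq, hqn, hp1, hq1⟩
        have : hasPB s t p = true :=
          (hasPB_iff s t p).mpr ⟨q, hqn, hpq, by rw [hp1, hq1]; omega⟩
        rw [hall p] at this; simp at this
      simp only [this]
    · simp only [ht0, if_false]
      have htpos : 0 < t := lt_of_le_of_ne ht (fun h => ht0 h.symm)
      have : s.find? (fun v => PySem.Set.contains (PySem.Set.ofList s) (v + t)) = none := by
        apply find?_none_of_all _ 0
        intro j hj
        by_contra hc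
        have hmem : s.getD j 0 + t ∈ s := by
          rw [← PySem.Set.mem_ofList, ← PySem.Set.contains_iff]
          simpa using hc
        rcases List.mem_iff_getElem.mp hmem with ⟨k, hk, hkv⟩
        have hkD : s.getD k 0 = s.getD j 0 + t := by
          rw [List.getD_eq_getElem _ _ hk]; exact hkv
        have hjk : j < k := by
          by_contra hc2
          have : s.getD k 0 ≤ s.getD j 0 := getD_mono hs (by omega) hj
          omega
        have : hasPB s t j = true :=
          (hasPB_iff s t j).mpr ⟨k, hk, hjk, by omega⟩
        rw [hall j] at this; simp at this
      simp only [this]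

-- ===== VERDICT (by name: the statement is the Claim_ definition above) =====
theorem two_sum7_spec : Claim_equal_two_sum7 := by
  intro nums target _
  unfold Spec_two_sum7
  by_cases hne : nums.length = 0
  · rw [two_sum7, two_sum7_alt, if_pos hne, if_pos hne]
  · rw [two_sum7, if_neg hne]
    set s := PySem.List.sorted nums (fun x => x) false with hsdef
    have hs : s.Pairwise (· ≤ ·) := by
      have := PySem.List.sorted_pairwise nums (fun x => x)
      simpa using this
    rw [alt_eq_specRes nums target hne, ← hsdef]
    exact twoSumLoop_eq s |target| hs (abs_nonneg _) (2 * s.length + 1) 0 0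
      (by omega) (by omega) (by omega) (by omega) (by omega)
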